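-- pv_equiv track=rewrite | github.com/narupanta/MGN_ADM | core/datasetclass.py | get_load_metadata
-- ===== SOURCE A (Python) =====
-- def get_load_metadata(data_config) :
--     load_values = data_config["dynamic"]["load"].keys()
--     load_metadata = []
--     dim_count = 0
--     for _, v in enumerate(load_values) :
--         load_dim = data_config["dynamic"]["load"][v]["dim"]
--         load_metadata.append((v, dim_count, load_dim))
--         dim_count += load_dim
--     return load_metadata
-- ===== SOURCE B (Python) =====
-- def get_load_metadata(data_config):
--     load = data_config["dynamic"]["load"]
--     dims = [entry["dim"] for entry in load.values()]
--     offsets = [sum(dims[:i]) for i in range(len(dims))]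
--     return list(zip(load.keys(), offsets, dims))
-- ===== Notes on version B (the rewrite author's own statement) =====
-- stated objective: alternative
-- what changed: Replaces the single running-accumulator loop (appending while mutating dim_count) with three separate value-level passes: a dims list comprehension over load.values(), an offsets list computed per index as sum(dims[:i]), and a final zip of keys, offsets and dims.
import Mathlib
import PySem

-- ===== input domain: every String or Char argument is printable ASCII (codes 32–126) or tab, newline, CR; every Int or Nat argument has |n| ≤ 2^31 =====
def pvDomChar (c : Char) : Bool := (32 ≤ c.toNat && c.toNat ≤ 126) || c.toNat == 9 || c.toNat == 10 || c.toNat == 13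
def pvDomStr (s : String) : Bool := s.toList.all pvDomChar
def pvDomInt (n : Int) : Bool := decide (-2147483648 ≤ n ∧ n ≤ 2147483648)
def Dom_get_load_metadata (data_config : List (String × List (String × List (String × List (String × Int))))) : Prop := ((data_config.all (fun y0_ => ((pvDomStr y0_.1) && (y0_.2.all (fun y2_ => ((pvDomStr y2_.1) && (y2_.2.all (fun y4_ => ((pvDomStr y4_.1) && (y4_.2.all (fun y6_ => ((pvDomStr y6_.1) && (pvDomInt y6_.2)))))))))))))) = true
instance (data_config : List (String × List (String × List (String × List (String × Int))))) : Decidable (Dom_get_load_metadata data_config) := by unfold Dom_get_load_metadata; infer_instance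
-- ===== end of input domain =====

-- B replaces A's running-accumulator loop with three separate passes (a dims list, a
-- per-index prefix-sum offsets list, and a zip); same return value (objective: alternative).

-- shared helper: the "load" sub-dict of the config, as an insertion-ordered dict
def pvLoadOf (data_config : List (String × List (String × List (String × List (String × Int))))) :
    PySem.Dict String (List (String × Int)) :=
  PySem.Dict.mk ((PySem.Dict.mk ((PySem.Dict.mk data_config).getD "dynamic" [])).getD "load" [])

-- ===== PORT A =====
-- literal transliteration of A: one loop over the load keys, looking each key up in the
-- load dict, appending (key, dim_count, dim) and accumulating dim_count.
-- The getD defaults are reached only outside Pre_ (where the Python raises KeyError).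
def get_load_metadata (data_config : List (String × List (String × List (String × List (String × Int))))) : List (String × Int × Int) :=
  let load := pvLoadOf data_config
  (load.keys.foldl
    (fun (st : List (String × Int × Int) × Int) v =>
      let load_dim := (PySem.Dict.mk (load.getD v [])).getD "dim" 0
      (st.1 ++ [(v, st.2, load_dim)], st.2 + load_dim))
    ([], 0)).1

-- ===== PORT B =====
-- literal transliteration of Source B: dims comprehension over the values, offsets list
-- (sum of the length-i prefix of dims, per index), then zip of keys, offsets and dims.
def get_load_metadata_alt (data_config : List (String × List (String × List (String × List (String × Int))))) : List (String × Int × Int) :=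
  let load := pvLoadOf data_config
  let dims := load.values.map (fun entry => (PySem.Dict.mk entry).getD "dim" 0)
  let offsets := (List.range dims.length).map (fun i => (dims.take i).sum)
  load.keys.zip (offsets.zip dims)

-- ===== PRECONDITION & SPEC =====
-- Pre_ excludes the inputs where the Python A raises KeyError ("dynamic", "load" or some
-- "dim" key missing), and association lists whose "load" level has duplicate keys: those
-- represent no Python dict at all (a dict cannot hold duplicate keys), so neither program's
-- Python behaviour is defined there.
def Pre_get_load_metadata (data_config : List (String × List (String × List (String × List (String × Int))))) : Prop :=
  (PySem.Dict.mk data_config).contains "dynamic" = true ∧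
  (PySem.Dict.mk ((PySem.Dict.mk data_config).getD "dynamic" [])).contains "load" = true ∧
  ((pvLoadOf data_config).items.map Prod.fst).Nodup ∧
  ∀ e ∈ (pvLoadOf data_config).items, (PySem.Dict.mk e.2).contains "dim" = true
instance (data_config : List (String × List (String × List (String × List (String × Int))))) : Decidable (Pre_get_load_metadata data_config) := by unfold Pre_get_load_metadata; infer_instance

def pvWitness_get_load_metadata : (List (String × List (String × List (String × List (String × Int))))) :=
  [("dynamic", [("load", [("fx", [("dim", 2)]), ("fy", [("dim", 3)])])])]

def Spec_get_load_metadata (data_config : List (String × List (String × List (String × List (String × Int))))) (out : List (String × Int × Int)) : Prop := out = get_load_metadata_alt data_config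
instance (data_config : List (String × List (String × List (String × List (String × Int))))) (out : List (String × Int × Int)) : Decidable (Spec_get_load_metadata data_config out) := by unfold Spec_get_load_metadata; infer_instance

-- ===== CLAIM (what is proved, stated in full; the proofs are below) =====
def Claim_equal_get_load_metadata : Prop := ∀ (data_config : List (String × List (String × List (String × List (String × Int))))), Dom_get_load_metadata data_config → Pre_get_load_metadata data_config → Spec_get_load_metadata data_config (get_load_metadata data_config)

-- ===== LEMMAS AND PROOFS =====

-- the common value both programs produce: the entries in order, each with the running offset
def pvZipSpec (f : List (String × Int) → Int) :
    List (String × List (String × Int)) → Int → List (String × Int × Int)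
  | [], _ => []
  | p :: t, c => (p.1, c, f p.2) :: pvZipSpec f t (c + f p.2)

-- A's accumulator loop over the entries produces pvZipSpec
lemma pvA_fold_eq (f : List (String × Int) → Int) (l : List (String × List (String × Int))) :
    ∀ (acc : List (String × Int × Int)) (c : Int),
      (l.foldl (fun (st : List (String × Int × Int) × Int) p =>
        (st.1 ++ [(p.1, st.2, f p.2)], st.2 + f p.2)) (acc, c)).1
      = acc ++ pvZipSpec f l c := by
  induction l with
  | nil => intro acc c; simp [pvZipSpec]
  | cons p t ih => intro acc c; simp [List.foldl_cons, pvZipSpec, ih]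

-- B's zip of keys, prefix sums and dims produces pvZipSpec
lemma pvB_zip_eq (f : List (String × Int) → Int) (l : List (String × List (String × Int))) :
    ∀ (c : Int),
      (l.map Prod.fst).zip
        ((((List.range (l.map (fun p => f p.2)).length).map
            (fun i => c + ((l.map (fun p => f p.2)).take i).sum))).zip
          (l.map (fun p => f p.2)))
      = pvZipSpec f l c := by
  induction l with
  | nil => intro c; simp [pvZipSpec]
  | cons p t ih =>
    intro c
    simp only [List.map_cons, List.length_cons, List.range_succ_eq_map, List.map_map,
      List.take_zero, List.sum_nil, add_zero, List.zip_cons_cons, pvZipSpec]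
    congr 1
    rw [← ih (c + f p.2)]
    congr 2
    apply List.map_congr_left
    intro i _
    simp [Function.comp, List.take_succ_cons, add_assoc]

-- ===== VERDICT (by name: the statement is the Claim_ definition above) =====
theorem get_load_metadata_spec : Claim_equal_get_load_metadata := by
  intro dc _hdom hpre
  obtain ⟨_h1, _h2, hnd, _hdim⟩ := hpre
  unfold Spec_get_load_metadata get_load_metadata get_load_metadata_alt
  dsimp only
  generalize hl : pvLoadOf dc = load at hnd ⊢
  set f : List (String × Int) → Int := fun e => (PySem.Dict.mk e).getD "dim" 0 with hf
  have hkeys : load.keys = load.items.map Prod.fst := by simp [PySem.Dict.keys]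
  have hvals : load.values = load.items.map Prod.snd := by simp [PySem.Dict.values]
  have hA :
      (load.keys.foldl
        (fun (st : List (String × Int × Int) × Int) v =>
          (st.1 ++ [(v, st.2, f (load.getD v []))], st.2 + f (load.getD v [])))
        ([], 0)).1
      = pvZipSpec f load.items 0 := by
    rw [hkeys, List.foldl_map]
    have hstep :
        load.items.foldl
          (fun (st : List (String × Int × Int) × Int) p =>
            (st.1 ++ [(p.1, st.2, f (load.getD p.1 []))], st.2 + f (load.getD p.1 [])))
          ([], 0)
        = load.items.foldl
          (fun (st : List (String × Int × Int) × Int) p =>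
            (st.1 ++ [(p.1, st.2, f p.2)], st.2 + f p.2))
          ([], 0) := by
      apply PySem.List.foldl_congr_mem
      intro st p hp
      obtain ⟨k, e⟩ := p
      have hg : load.getD k [] = e :=
        PySem.Dict.getD_of_mem_items load hp (by simpa [PySem.Dict.keys] using hnd) []
      simp only [hg]
    rw [hstep, pvA_fold_eq]
    simp
  have hB := pvB_zip_eq f load.items 0
  simp only [zero_add] at hB
  rw [hA, hkeys, hvals, List.map_map]
  simpa [Function.comp] using hB.symm
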